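-- pv_equiv track=rewrite | github.com/inf8212/INF8212_Labo_Automne2020 | Exercice_d_integration/code/apparimentsEtendus_naif.py | apparimentsEtendus_naif
-- ===== SOURCE A (Python) =====
-- def apparimentsEtendus_naif(s, t):
--
--     n = len(s)
--     if len(t) != n: return None
--
--     positions = []
--     for index_s, value_s in enumerate(s):
--         for index_t, value_t in enumerate(t):
--             if value_s == value_t: positions.append((index_s, index_t))
--
--     return positions
-- ===== SOURCE B (Python) =====
-- def apparimentsEtendus_naif(s, t):
--     if len(t) != len(s):
--         return None
--     idx = {}
--     for j, v in enumerate(t):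
--         idx.setdefault(v, []).append(j)
--     return [(i, j) for i, v in enumerate(s) for j in idx.get(v, [])]
-- ===== Notes on version B (the rewrite author's own statement) =====
-- stated objective: alternative
-- what changed: B groups the indices of t by value in a dict built in one pass and emits the pairs with a single comprehension over s, removing A's inner scan of t (O(n + output) instead of O(n^2), though on match-dense inputs the output itself dominates).
import Mathlib
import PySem

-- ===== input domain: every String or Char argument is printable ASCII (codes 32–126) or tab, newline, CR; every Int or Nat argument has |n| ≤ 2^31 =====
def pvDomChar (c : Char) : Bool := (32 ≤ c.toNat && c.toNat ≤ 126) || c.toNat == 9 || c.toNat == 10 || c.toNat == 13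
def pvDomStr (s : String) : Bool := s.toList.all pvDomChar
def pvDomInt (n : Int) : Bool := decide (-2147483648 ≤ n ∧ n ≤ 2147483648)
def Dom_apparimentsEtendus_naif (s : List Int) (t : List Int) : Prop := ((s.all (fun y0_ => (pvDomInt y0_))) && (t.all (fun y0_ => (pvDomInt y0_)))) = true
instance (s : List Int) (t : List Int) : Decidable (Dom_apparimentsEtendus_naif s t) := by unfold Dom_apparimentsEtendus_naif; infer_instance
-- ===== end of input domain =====

-- B replaces A's inner scan of t by a dict grouping t's indices by value, emitting pairs in one pass over s (objective: alternative algorithm).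

-- ===== PORT A =====
-- literal port: nested enumerate loops appending (index_s, index_t) on equal values
def apparimentsEtendus_naif (s : List Int) (t : List Int) : Option (List (Int × Int)) :=
  if t.length ≠ s.length then none
  else
    some ((PySem.List.enumerate s).foldl (fun positions p =>
      (PySem.List.enumerate t).foldl (fun positions q =>
        if p.2 = q.2 then positions ++ [(p.1, q.1)] else positions) positions) [])

-- ===== PORT B =====
-- literal port of Source B: build idx : value ↦ list of t-indices, then one pass over s
def apparimentsEtendus_naif_alt (s : List Int) (t : List Int) : Option (List (Int × Int)) :=
  if t.length ≠ s.length then none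
  else
    let idx := (PySem.List.enumerate t).foldl
      (fun d q => d.modify q.2 [] (fun l => l ++ [q.1])) PySem.Dict.empty
    some ((PySem.List.enumerate s).flatMap (fun p =>
      (idx.getD p.2 []).map (fun j => (p.1, j))))

-- ===== PRECONDITION & SPEC =====
def Spec_apparimentsEtendus_naif (s : List Int) (t : List Int) (out : Option (List (Int × Int))) : Prop := out = apparimentsEtendus_naif_alt s t
instance (s : List Int) (t : List Int) (out : Option (List (Int × Int))) : Decidable (Spec_apparimentsEtendus_naif s t out) := by unfold Spec_apparimentsEtendus_naif; infer_instance

-- ===== CLAIM (what is proved, stated in full; the proofs are below) =====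
def Claim_equal_apparimentsEtendus_naif : Prop := ∀ (s : List Int) (t : List Int), Dom_apparimentsEtendus_naif s t → Spec_apparimentsEtendus_naif s t (apparimentsEtendus_naif s t)

-- ===== LEMMAS AND PROOFS =====

-- the grouping dict: looking up c yields the first components of the pairs whose second component is c
theorem getD_group_snd (l : List (Int × Int)) (d : PySem.Dict Int (List Int)) (c : Int) :
    (l.foldl (fun d q => d.modify q.2 [] (fun l => l ++ [q.1])) d).getD c [] =
      d.getD c [] ++ (l.filter (fun q => q.2 == c)).map (·.1) := by
  induction l generalizing d with
  | nil => simp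
  | cons q l ih =>
      simp only [List.foldl_cons, ih, List.filter_cons]
      rw [PySem.Dict.getD_modify]
      by_cases h : c = q.2
      · subst h; simp
      · rw [if_neg h]
        have hb : (q.2 == c) = false := by simp [beq_eq_false_iff_ne, Ne.symm h]
        simp [hb]

-- A's inner loop over t appends exactly the matches of value vs
theorem innerA (l : List (Int × Int)) (is vs : Int) (acc : List (Int × Int)) :
    l.foldl (fun positions q =>
        if vs = q.2 then positions ++ [(is, q.1)] else positions) acc =
      acc ++ (l.filter (fun q => q.2 == vs)).map (fun q => (is, q.1)) := by
  induction l generalizing acc with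
  | nil => simp
  | cons q l ih =>
      simp only [List.foldl_cons, List.filter_cons, ih]
      by_cases h : vs = q.2
      · subst h; simp
      · rw [if_neg h]
        have hb : (q.2 == vs) = false := by simp [beq_eq_false_iff_ne, Ne.symm h]
        simp [hb]

-- fold bodies equal on the list's members give equal folds
theorem foldl_body_ext {α β : Type} (f g : β → α → β) (l : List α)
    (h : ∀ acc x, x ∈ l → f acc x = g acc x) :
    ∀ acc, l.foldl f acc = l.foldl g acc := by
  induction l with
  | nil => intro acc; rfl
  | cons x l ih =>
      intro acc
      simp only [List.foldl_cons, h acc x List.mem_cons_self]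
      exact ih (fun acc y hy => h acc y (List.mem_cons_of_mem _ hy)) _

-- 'out.extend(g(x))' loop = flatMap
theorem foldl_extend {α β : Type} (g : α → List β) (l : List α) (acc : List β) :
    l.foldl (fun acc p => acc ++ g p) acc = acc ++ l.flatMap g := by
  induction l generalizing acc with
  | nil => simp
  | cons x l ih => simp [ih]

theorem apparimentsEtendus_naif_eq_alt (s t : List Int) :
    apparimentsEtendus_naif s t = apparimentsEtendus_naif_alt s t := by
  unfold apparimentsEtendus_naif apparimentsEtendus_naif_alt
  by_cases h : t.length ≠ s.length
  · simp [h]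
  · simp only [h, if_false]
    congr 1
    have hbody : ∀ (acc : List (Int × Int)) (p : Int × Int), p ∈ PySem.List.enumerate s →
        (PySem.List.enumerate t).foldl (fun positions q =>
          if p.2 = q.2 then positions ++ [(p.1, q.1)] else positions) acc =
        acc ++ (List.filter (fun q => q.2 == p.2) (PySem.List.enumerate t)).map
          (fun q => (p.1, q.1)) :=
      fun acc p _ => innerA _ p.1 p.2 acc
    rw [foldl_body_ext _ (fun acc p =>
      acc ++ (List.filter (fun q => q.2 == p.2) (PySem.List.enumerate t)).map
        (fun q => (p.1, q.1))) _ (fun acc p hp => hbody acc p hp) [],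
      foldl_extend, List.nil_append]
    apply List.flatMap_congr
    intro p _
    rw [getD_group_snd, PySem.Dict.getD_empty, List.nil_append, List.map_map]
    rfl

-- ===== VERDICT (by name: the statement is the Claim_ definition above) =====
theorem apparimentsEtendus_naif_spec : Claim_equal_apparimentsEtendus_naif := by
  intro s t _
  exact (apparimentsEtendus_naif_eq_alt s t).symm ▸ rfl
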